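-- pv_equiv track=rewrite | github.com/kinghini/Assignment-no1 | Programming_assignment_no_24.py | fn1
-- ===== SOURCE A (Python) =====
-- def fn1(n):
--     b=[]
--     l=list(range(1,n+1))
--     for j in l:
--         if (j%4)==0:
--             a=10*j
--         else:
--             a=j
--         b.append(a)
--     return(b)
-- ===== SOURCE B (Python) =====
-- def fn1(n):
--     b = list(range(1, n + 1))
--     for i in range(3, n, 4):
--         b[i] *= 10
--     return b
-- ===== Notes on version B (the rewrite author's own statement) =====
-- stated objective: alternative
-- what changed: B builds the plain list 1..n in one shot with range and then scales only the multiples of 4 in a second stride-4 index pass (b[i] *= 10 for i in range(3, n, 4)), instead of A's single pass that tests j%4 on every element and appends one by one.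
import Mathlib
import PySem

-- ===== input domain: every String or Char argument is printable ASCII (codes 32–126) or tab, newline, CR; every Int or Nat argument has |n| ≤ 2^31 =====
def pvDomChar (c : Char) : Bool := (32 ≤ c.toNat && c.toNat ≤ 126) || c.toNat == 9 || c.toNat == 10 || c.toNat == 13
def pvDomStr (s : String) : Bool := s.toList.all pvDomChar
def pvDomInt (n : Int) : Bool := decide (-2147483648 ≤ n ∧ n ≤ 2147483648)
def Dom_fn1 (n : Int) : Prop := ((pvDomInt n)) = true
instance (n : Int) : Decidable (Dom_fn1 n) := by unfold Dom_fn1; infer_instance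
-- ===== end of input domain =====

-- B builds the plain list 1..n once and then scales only the multiples of 4 in a second
-- stride-4 index pass, instead of A's single element-by-element pass testing j%4 (alternative decomposition).


-- ===== PORT A =====
-- b=[]; for j in range(1, n+1): a = 10*j if j%4==0 else j; b.append(a)
def fn1 (n : Int) : List Int :=
  (PySem.List.pyRange 1 (n + 1) 1).foldl
    (fun b j => b ++ [if PySem.Int.mod j 4 == 0 then 10 * j else j]) []

-- ===== PORT B =====
-- b = list(range(1, n+1)); for i in range(3, n, 4): b[i] *= 10   (i ≥ 3, so i.toNat is exact)
def fn1_alt (n : Int) : List Int :=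
  let b := PySem.List.pyRange 1 (n + 1) 1
  (PySem.List.pyRange 3 n 4).foldl (fun b i => b.modify i.toNat (· * 10)) b

-- ===== PRECONDITION & SPEC =====
def Spec_fn1 (n : Int) (out : List Int) : Prop := out = fn1_alt n
instance (n : Int) (out : List Int) : Decidable (Spec_fn1 n out) := by unfold Spec_fn1; infer_instance

-- ===== CLAIM (what is proved, stated in full; the proofs are below) =====
def Claim_equal_fn1 : Prop := ∀ (n : Int), Dom_fn1 n → Spec_fn1 n (fn1 n)

-- ===== LEMMAS AND PROOFS =====

-- A fold of in-place scalings at pairwise-distinct indices, read back at position j.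
theorem foldl_modify_getElem? (is : List Int) (hnd : (is.map Int.toNat).Nodup) (b : List Int) (j : Nat) :
    (is.foldl (fun b i => b.modify i.toNat (· * 10)) b)[j]? =
      if j ∈ is.map Int.toNat then (b[j]?).map (· * 10) else b[j]? := by
  induction is generalizing b with
  | nil => simp
  | cons i is ih =>
    simp only [List.map_cons, List.nodup_cons] at hnd
    simp only [List.foldl_cons, List.map_cons, List.mem_cons]
    rw [ih hnd.2]
    by_cases hmem : j ∈ is.map Int.toNat
    · have hne : i.toNat ≠ j := fun h => hnd.1 (h ▸ hmem)
      simp [hmem, hne]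
    · by_cases hij : j = i.toNat
      · subst hij
        simp [hmem]
      · simp [hmem, hij, Ne.symm hij]

theorem toNat_map_pyRange_nodup (n : Int) : ((PySem.List.pyRange 3 n 4).map Int.toNat).Nodup := by
  rw [PySem.List.pyRange_of_pos 3 n (by norm_num), List.map_map]
  refine List.Nodup.map ?_ List.nodup_range
  intro x y h
  simp only [Function.comp_apply] at h
  omega

theorem mem_toNat_map_pyRange (n : Int) (j : Nat) :
    j ∈ (PySem.List.pyRange 3 n 4).map Int.toNat ↔ (3 ≤ (j : Int) ∧ (j : Int) < n ∧ (4 : Int) ∣ (j : Int) - 3) := by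
  simp only [List.mem_map]
  constructor
  · rintro ⟨i, hi, rfl⟩
    rw [PySem.List.mem_pyRange_iff_of_pos (by norm_num)] at hi
    obtain ⟨h1, h2, h3⟩ := hi
    have : ((i.toNat : Int)) = i := Int.toNat_of_nonneg (by omega)
    rw [this]; exact ⟨h1, h2, h3⟩
  · rintro ⟨h1, h2, h3⟩
    exact ⟨(j : Int), (PySem.List.mem_pyRange_iff_of_pos (by norm_num) _).2 ⟨h1, h2, h3⟩, by omega⟩

-- ===== VERDICT (by name: the statement is the Claim_ definition above) =====
theorem fn1_spec : Claim_equal_fn1 := by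
  intro n _
  unfold Spec_fn1 fn1 fn1_alt
  rw [PySem.List.foldl_append_singleton_eq_map, List.nil_append]
  apply List.ext_getElem?
  intro j
  rw [foldl_modify_getElem? _ (toNat_map_pyRange_nodup n)]
  simp only [mem_toNat_map_pyRange, List.getElem?_map, PySem.List.getElem?_pyRange_one]
  by_cases hj : j < (n + 1 - 1).toNat
  · have hjn : (j : Int) < n := by omega
    simp only [hj, if_pos, Option.map_some]
    by_cases hd : (4 : Int) ∣ (j : Int) - 3
    · have h3 : 3 ≤ (j : Int) := by omega
      have hm : PySem.Int.mod (1 + (j : Int)) 4 = 0 := by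
        unfold PySem.Int.mod
        rw [Int.fmod_eq_emod, if_pos (Or.inl (by norm_num : (0:Int) ≤ 4))]
        omega
      simp only [h3, hjn, hd, and_self, if_pos, hm]
      norm_num [Int.mul_comm]
    · simp [hd]
      intro h
      omega
  · have : ¬ ((j : Int) < n) := by omega
    simp [this]
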